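-- pv_equiv track=rewrite | github.com/behenate/ASD | Sekcja_2_Kolokwium_2/Bit_Algo/Bit_Algo_4/zad_8_sciezka.py | DFS
-- ===== SOURCE A (Python) =====
-- def DFS(G, s_i):
--     def DFS_visit(G, i):
--         visited[i] = True
--         for neigh in G[i]:
--             if not visited[neigh]:
--                 dist[neigh] = dist[i] + 1
--                 DFS_visit(G, neigh)
--     n = len(G)
--     dist = [0 for _ in range(n)]
--     visited = [False for _ in range(n)]
--     DFS_visit(G, s_i)
--     return dist
-- ===== SOURCE B (Python) =====
-- def DFS(G, s_i):
--     n = len(G)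
--     dist = [0] * n
--     visited = [False] * n
--     visited[s_i] = True
--     stack = [(s_i, iter(G[s_i]))]
--     while stack:
--         i, it = stack[-1]
--         neigh = next(it, None)
--         if neigh is None:
--             stack.pop()
--         elif not visited[neigh]:
--             visited[neigh] = True
--             dist[neigh] = dist[i] + 1
--             stack.append((neigh, iter(G[neigh])))
--     return dist
-- ===== Notes on version B (the rewrite author's own statement) =====
-- stated objective: alternative
-- what changed: Replaces the recursive DFS_visit closure with an explicit-stack loop keeping (vertex, iterator) frames, reproducing the same preorder tree distances without recursion.
-- outside the precondition, e.g. on DFS([[], [5]], 0): A returns [0, 0], B returns [0, 0]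
import Mathlib
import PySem

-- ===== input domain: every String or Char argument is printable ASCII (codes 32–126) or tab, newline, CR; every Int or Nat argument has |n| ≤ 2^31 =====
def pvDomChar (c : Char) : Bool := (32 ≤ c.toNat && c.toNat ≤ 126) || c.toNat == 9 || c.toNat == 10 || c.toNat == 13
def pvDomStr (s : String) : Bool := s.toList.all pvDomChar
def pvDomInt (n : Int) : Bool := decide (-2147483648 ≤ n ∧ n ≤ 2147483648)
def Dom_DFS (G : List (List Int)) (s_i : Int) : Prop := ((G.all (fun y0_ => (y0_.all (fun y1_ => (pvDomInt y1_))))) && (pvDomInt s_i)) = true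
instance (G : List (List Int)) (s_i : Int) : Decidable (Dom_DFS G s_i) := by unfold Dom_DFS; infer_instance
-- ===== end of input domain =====

-- B replaces the recursive DFS_visit with an explicit-stack loop over (vertex, iterator) frames;
-- same preorder, same dist values.  The equivalence is about the return value (neither Python mutates its arguments).

-- ===== PORT A =====
-- A's recursion is ported with a fuel counter (n+1 always suffices, proved below);
-- dfsVisit = the body of DFS_visit, dfsGo = its 'for neigh in G[i]' loop; none = IndexError.
mutual
def dfsVisit (G : List (List Int)) : Nat → Int → List Int → List Bool → Option (List Int × List Bool)
  | 0, _, _, _ => none          -- fuel exhausted (never happens on the call DFS makes)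
  | f + 1, i, dist, visited =>
    match PySem.List.pySet? visited i true with        -- visited[i] = True
    | none => none
    | some visited1 =>
      match PySem.List.pyGet? G i with                 -- G[i]
      | none => none
      | some ns => dfsGo G f i ns dist visited1
termination_by f _ _ _ => (f, 0)

def dfsGo (G : List (List Int)) : Nat → Int → List Int → List Int → List Bool → Option (List Int × List Bool)
  | _, _, [], dist, visited => some (dist, visited)
  | f, i, x :: rest, dist, visited =>
    match PySem.List.pyGet? visited x with             -- visited[neigh]
    | none => none
    | some true => dfsGo G f i rest dist visited
    | some false =>
      match PySem.List.pyGet? dist i with              -- dist[i]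
      | none => none
      | some di =>
        match PySem.List.pySet? dist x (di + 1) with   -- dist[neigh] = dist[i] + 1
        | none => none
        | some dist1 =>
          match dfsVisit G f x dist1 visited with      -- DFS_visit(G, neigh)
          | none => none
          | some (dist2, visited2) => dfsGo G f i rest dist2 visited2
termination_by f _ ns _ _ => (f, ns.length + 1)
end

def DFS (G : List (List Int)) (s_i : Int) : List Int :=
  let n := G.length
  let dist := List.replicate n (0 : Int)
  let visited := List.replicate n false
  match dfsVisit G (n + 1) s_i dist visited with
  | some (d, _) => d
  | none => dist            -- A raises here; excluded by Pre_DFS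

-- ===== PORT B =====
-- termination helpers for runB (cited by name in its decreasing_by)
def unvis (visited : List Bool) : Nat := visited.count false

theorem pyGet?_elim {α : Type} {xs : List α} {i : Int} {v : α}
    (h : PySem.List.pyGet? xs i = some v) :
    ∃ k, PySem.List.pyIdx? xs.length i = some k ∧ xs[k]? = some v := by
  simpa [PySem.List.pyGet?, Option.bind_eq_some_iff] using h

theorem pySet?_eq {α : Type} (xs : List α) (i : Int) (w : α) {k : Nat}
    (hk : PySem.List.pyIdx? xs.length i = some k) :
    PySem.List.pySet? xs i w = some (xs.set k w) := by
  simp [PySem.List.pySet?, hk]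

theorem count_false_set_true (xs : List Bool) (k : Nat) (h : xs[k]? = some false) :
    (xs.set k true).count false + 1 = xs.count false := by
  induction xs generalizing k with
  | nil => simp at h
  | cons a t ih =>
    cases k with
    | zero => simp_all
    | succ k =>
      simp only [List.getElem?_cons_succ] at h
      simp [List.count_cons, ← ih k h]; omega

theorem unvis_set_lt {visited : List Bool} {x : Int} {visited1 : List Bool}
    (hvx : PySem.List.pyGet? visited x = some false)
    (hsx : PySem.List.pySet? visited x true = some visited1) :
    unvis visited1 < unvis visited := by
  obtain ⟨k, hk, hget⟩ := pyGet?_elim hvx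
  rw [pySet?_eq visited x true hk] at hsx
  cases hsx
  have := count_false_set_true visited k hget
  unfold unvis; omega

-- the while loop of B: each frame is (vertex, what remains of iter(G[vertex]))
def runB (G : List (List Int)) : List (Int × List Int) → List Int → List Bool → Option (List Int × List Bool)
  | [], dist, visited => some (dist, visited)
  | (i, ns) :: stack, dist, visited =>
    match ns with
    | [] => runB G stack dist visited                  -- iterator exhausted: stack.pop()
    | x :: rest =>
      match hvx : PySem.List.pyGet? visited x with     -- visited[neigh]
      | none => none
      | some true => runB G ((i, rest) :: stack) dist visited
      | some false =>
        match hsx : PySem.List.pySet? visited x true with   -- visited[neigh] = True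
        | none => none
        | some visited1 =>
          match PySem.List.pyGet? dist i with          -- dist[i]
          | none => none
          | some di =>
            match PySem.List.pySet? dist x (di + 1) with    -- dist[neigh] = dist[i] + 1
            | none => none
            | some dist1 =>
              match PySem.List.pyGet? G x with         -- iter(G[neigh])
              | none => none
              | some nsx => runB G ((x, nsx) :: (i, rest) :: stack) dist1 visited1
termination_by stack _ visited => (unvis visited, (stack.map fun p => p.2.length).sum, stack.length)
decreasing_by
  · simp only [List.map_cons, List.sum_cons, List.length_cons, List.length_nil, Nat.zero_add]
    apply Prod.Lex.right
    apply Prod.Lex.right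
    exact Nat.lt_succ_self _
  · exact Prod.Lex.right _ (Prod.Lex.left _ _ (by simp))
  · exact Prod.Lex.left _ _ (unvis_set_lt hvx hsx)

def DFS_alt (G : List (List Int)) (s_i : Int) : List Int :=
  let n := G.length
  let dist := List.replicate n (0 : Int)
  let visited := List.replicate n false
  match PySem.List.pySet? visited s_i true with        -- visited[s_i] = True
  | none => dist            -- B raises here; excluded by Pre_DFS
  | some visited1 =>
    match PySem.List.pyGet? G s_i with                 -- iter(G[s_i])
    | none => dist
    | some ns =>
      match runB G [(s_i, ns)] dist visited1 with
      | some (d, _) => d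
      | none => dist

-- ===== PRECONDITION & SPEC =====
-- Pre_DFS requires s_i and EVERY adjacency-list entry to be a valid (possibly negative) index.
-- This is slightly narrower than where A returns: an out-of-range entry only raises when it is
-- REACHABLE from s_i; on inputs with unreachable bad entries A and B return the same value anyway
-- (reachability is not a closed-form condition, so we keep the simple per-entry bound).
def Pre_DFS (G : List (List Int)) (s_i : Int) : Prop :=
  PySem.Raise.InRange G.length s_i ∧ ∀ l ∈ G, ∀ x ∈ l, PySem.Raise.InRange G.length x
instance (G : List (List Int)) (s_i : Int) : Decidable (Pre_DFS G s_i) := by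
  unfold Pre_DFS PySem.Raise.InRange; infer_instance

def pvWitness_DFS : List (List Int) × Int := ([[1, 2], [0, -1], [2]], 0)

def Spec_DFS (G : List (List Int)) (s_i : Int) (out : List Int) : Prop := out = DFS_alt G s_i
instance (G : List (List Int)) (s_i : Int) (out : List Int) : Decidable (Spec_DFS G s_i out) := by unfold Spec_DFS; infer_instance

-- ===== CLAIM (what is proved, stated in full; the proofs are below) =====
def Claim_equal_DFS : Prop := ∀ (G : List (List Int)) (s_i : Int), Dom_DFS G s_i → Pre_DFS G s_i → Spec_DFS G s_i (DFS G s_i)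

-- ===== LEMMAS AND PROOFS =====

theorem pyGet?_isSome_of_inRange {α : Type} (xs : List α) (i : Int)
    (h : PySem.Raise.InRange xs.length i) : ∃ v, PySem.List.pyGet? xs i = some v := by
  rcases hv : PySem.List.pyGet? xs i with _ | v
  · exact absurd h ((PySem.List.pyGet?_eq_none_iff xs i).mp hv)
  · exact ⟨v, rfl⟩

-- fuel adequacy for A: with fuel ≥ number of unvisited vertices, dfsGo returns `some`
-- (and preserves lengths, never increasing the unvisited count)
theorem dfsGo_adq (G : List (List Int))
    (hG : ∀ l ∈ G, ∀ x ∈ l, PySem.Raise.InRange G.length x) :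
    ∀ f : Nat, ∀ ns : List Int, ∀ (i : Int) (dist : List Int) (visited : List Bool),
      dist.length = G.length → visited.length = G.length →
      (∀ x ∈ ns, PySem.Raise.InRange G.length x) →
      PySem.Raise.InRange G.length i →
      visited.count false ≤ f →
      ∃ d' v', dfsGo G f i ns dist visited = some (d', v') ∧
        d'.length = G.length ∧ v'.length = G.length ∧ v'.count false ≤ visited.count false := by
  intro f
  induction f using Nat.strong_induction_on with
  | _ f IHf =>
  intro ns
  induction ns with
  | nil =>
    intro i dist visited hd hv _ _ _
    exact ⟨dist, visited, by rw [dfsGo], hd, hv, Nat.le_refl _⟩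
  | cons x rest IHns =>
    intro i dist visited hd hv hns hi hf
    have hx : PySem.Raise.InRange G.length x := hns x List.mem_cons_self
    obtain ⟨b, hvx⟩ := pyGet?_isSome_of_inRange visited x (hv ▸ hx)
    cases b
    · -- neighbour not yet visited
      obtain ⟨di, hdi⟩ := pyGet?_isSome_of_inRange dist i (hd ▸ hi)
      obtain ⟨k, hk, hgetk⟩ := pyGet?_elim hvx
      have hk' : PySem.List.pyIdx? dist.length x = some k := by rw [hd, ← hv]; exact hk
      have hsd := pySet?_eq dist x (di + 1) hk'
      have hmem : false ∈ visited := List.mem_of_getElem? hgetk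
      have hpos : 0 < visited.count false := List.count_pos_iff.mpr hmem
      cases f with
      | zero => omega
      | succ f' =>
        have hsv := pySet?_eq visited x true hk
        have hcount : (visited.set k true).count false + 1 = visited.count false :=
          count_false_set_true visited k hgetk
        obtain ⟨nsx, hgx⟩ := pyGet?_isSome_of_inRange G x hx
        have hnsxG : nsx ∈ G := PySem.List.mem_of_pyGet?_eq_some G hgx
        obtain ⟨d2, v2, hrun, hl1, hl2, hc2⟩ :=
          IHf f' (Nat.lt_succ_self f') nsx x (dist.set k (di + 1)) (visited.set k true)
            (by simpa using hd) (by simpa using hv)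
            (fun y hy => hG nsx hnsxG y hy) hx (by omega)
        obtain ⟨d3, v3, hrest, hl3, hl4, hc3⟩ :=
          IHns i d2 v2 hl1 hl2 (fun y hy => hns y (List.mem_cons_of_mem _ hy)) hi (by omega)
        refine ⟨d3, v3, ?_, hl3, hl4, by omega⟩
        rw [dfsGo]
        simp only [hvx, hdi, hsd]
        rw [dfsVisit]
        simp only [hsv, hgx, hrun, hrest]
    · -- neighbour already visited: skip
      obtain ⟨d3, v3, hrest, hl3, hl4, hc3⟩ :=
        IHns i dist visited hd hv (fun y hy => hns y (List.mem_cons_of_mem _ hy)) hi hf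
      refine ⟨d3, v3, ?_, hl3, hl4, hc3⟩
      rw [dfsGo]
      simp only [hvx, hrest]

-- simulation: B's stack loop run on a frame (i, ns) is exactly A's inner loop dfsGo
theorem sim (G : List (List Int)) :
    ∀ f : Nat, ∀ ns : List Int, ∀ (i : Int) (dist : List Int) (visited : List Bool)
      (out : List Int × List Bool),
      dfsGo G f i ns dist visited = some out →
      ∀ stack, runB G ((i, ns) :: stack) dist visited = runB G stack out.1 out.2 := by
  intro f
  induction f using Nat.strong_induction_on with
  | _ f IHf =>
  intro ns
  induction ns with
  | nil =>
    intro i dist visited out h stack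
    rw [dfsGo] at h
    injection h with h; subst h
    rw [runB]
  | cons x rest IHns =>
    intro i dist visited out h stack
    rw [dfsGo] at h
    rcases hvx : PySem.List.pyGet? visited x with _ | b <;> rw [hvx] at h
    · exact absurd h (by simp)
    cases b
    · -- neighbour not yet visited
      simp only at h
      rcases hdi : PySem.List.pyGet? dist i with _ | di <;> rw [hdi] at h
      · exact absurd h (by simp)
      simp only at h
      rcases hsd : PySem.List.pySet? dist x (di + 1) with _ | dist1 <;> rw [hsd] at h
      · exact absurd h (by simp)
      simp only at h
      rcases hvis : dfsVisit G f x dist1 visited with _ | p <;> rw [hvis] at h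
      · exact absurd h (by simp)
      obtain ⟨dist2, visited2⟩ := p
      simp only at h
      cases f with
      | zero => rw [dfsVisit] at hvis; exact absurd hvis (by simp)
      | succ f' =>
        rw [dfsVisit] at hvis
        rcases hsv : PySem.List.pySet? visited x true with _ | visited1 <;> rw [hsv] at hvis
        · exact absurd hvis (by simp)
        simp only at hvis
        rcases hgx : PySem.List.pyGet? G x with _ | nsx <;> rw [hgx] at hvis
        · exact absurd hvis (by simp)
        simp only at hvis
        rw [runB]
        simp only [hdi, hsd, hgx]
        split
        · next heq => rw [hvx] at heq; cases heq
        · next heq => rw [hvx] at heq; cases heq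
        · next heq =>
          split
          · next heq2 => rw [hsv] at heq2; cases heq2
          · next v1' heq2 =>
            rw [hsv] at heq2
            injection heq2 with heq2; subst heq2
            rw [IHf f' (Nat.lt_succ_self f') nsx x dist1 visited1 (dist2, visited2) hvis
              ((i, rest) :: stack)]
            exact IHns i dist2 visited2 out h stack
    · -- neighbour already visited: skip
      simp only at h
      rw [runB]
      split
      · next heq => rw [hvx] at heq; cases heq
      · next heq => exact IHns i dist visited out h stack
      · next heq => rw [hvx] at heq; cases heq

-- ===== VERDICT (by name: the statement is the Claim_ definition above) =====
theorem DFS_spec : Claim_equal_DFS := by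
  intro G s_i _ hPre
  obtain ⟨hs, hG⟩ := hPre
  unfold Spec_DFS DFS DFS_alt
  simp only []
  -- the source vertex in the fresh visited array
  obtain ⟨b, hb⟩ := pyGet?_isSome_of_inRange (List.replicate G.length false) s_i
    (by simpa using hs)
  have hbf : b = false :=
    List.eq_of_mem_replicate (PySem.List.mem_of_pyGet?_eq_some _ hb)
  subst hbf
  obtain ⟨k, hk, hgetk⟩ := pyGet?_elim hb
  have hsv := pySet?_eq (List.replicate G.length false) s_i true hk
  obtain ⟨ns0, hg0⟩ := pyGet?_isSome_of_inRange G s_i hs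
  have hns0G : ns0 ∈ G := PySem.List.mem_of_pyGet?_eq_some G hg0
  have hcount : ((List.replicate G.length false).set k true).count false + 1
      = (List.replicate G.length false).count false :=
    count_false_set_true _ k hgetk
  have hcount0 : (List.replicate G.length false).count false = G.length := by simp
  obtain ⟨d, v, hgo, _, _, _⟩ :=
    dfsGo_adq G hG G.length ns0 s_i (List.replicate G.length (0 : Int))
      ((List.replicate G.length false).set k true)
      (by simp) (by simp) (fun y hy => hG ns0 hns0G y hy) hs (by omega)
  -- A's side: one unfolding of dfsVisit, then the adequate inner loop
  rw [dfsVisit]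
  simp only [hsv, hg0, hgo]
  -- B's side: the initial marking, then the simulation of the single initial frame
  have hsim := sim G G.length ns0 s_i (List.replicate G.length (0 : Int))
    ((List.replicate G.length false).set k true) (d, v) hgo []
  rw [runB] at hsim
  simp only [hsim]
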